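-- pv_equiv track=rewrite | github.com/northfacee/- | 프로그래머스_2022 KAKAO BLIND RECRUITMENT 신고 결과 받기.py | solution
-- ===== SOURCE A (Python) =====
-- def solution(id_list, report, w):
--     report_list = {}
--     report_name = {}
--     for k in report:
--         if k.split(' ')[1] not in report_list:
--             report_list[k.split(' ')[1]] = 1
--         else:
--             report_list[k.split(' ')[1]] +=1
--
--         if k.split(' ')[0] not in report_name:
--             report_name[k.split(' ')[0]] = [k.split(' ')[1]]
--         else:
--             report_name[k.split(' ')[0]] += [k.split(' ')[1]]
--     for name in id_list:
--         if name not in report_list: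
--             report_list[name] = 0
--         if name not in report_name:
--             report_name[name] = ['X']
--
--     ban_list = []
--     report_list = sorted(report_list.items(), reverse=True, key=lambda x : x[1])
--     for ban in report_list:
--         if ban[1] == w:
--             ban_list.append(ban[0])
--
--     # ban_list, report_name
--
--
--
--     return report_name
-- ===== SOURCE B (Python) =====
-- def solution(id_list, report, w):
--     pairs = [r.split(' ') for r in report]
--     order = list(dict.fromkeys([p[0] for p in pairs] + id_list))
--     return {name: [p[1] for p in pairs if p[0] == name] or ['X'] for name in order}
-- ===== Notes on version B (the rewrite author's own statement) =====
-- stated objective: simpler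
-- what changed: Drops A's dead code (the report_list counter, the reverse sort, ban_list) and replaces the incremental two-dict grouping loop with: split each report once, compute the key order as an ordered dedup of reporter tokens followed by id_list, and build the dict in one comprehension that collects each key's reported tokens by filtering (empty -> ['X']).
import Mathlib
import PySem

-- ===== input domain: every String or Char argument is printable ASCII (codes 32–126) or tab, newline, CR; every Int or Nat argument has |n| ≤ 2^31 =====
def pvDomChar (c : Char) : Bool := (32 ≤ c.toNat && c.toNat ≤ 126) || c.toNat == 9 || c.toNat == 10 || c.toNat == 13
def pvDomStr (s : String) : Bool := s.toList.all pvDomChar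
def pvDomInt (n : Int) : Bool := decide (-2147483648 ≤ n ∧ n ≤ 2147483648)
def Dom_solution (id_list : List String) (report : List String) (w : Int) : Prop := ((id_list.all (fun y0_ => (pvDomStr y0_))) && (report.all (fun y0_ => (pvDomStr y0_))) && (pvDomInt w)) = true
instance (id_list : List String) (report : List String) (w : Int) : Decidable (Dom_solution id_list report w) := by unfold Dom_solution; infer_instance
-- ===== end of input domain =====

-- B drops A's dead code (the report_list counter, the reverse sort, ban_list) and builds the
-- reporter -> reported dict by ordered-dedup of the key order plus a per-key filter, instead of
-- A's incremental two-dict loop; same return value (simpler, not claimed faster).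


-- ===== PORT A =====
-- loop body of A's 'for k in report' (updates the pair (report_list, report_name));
-- k.split(' ')[i] is ported as pyGet? …; Pre_solution guarantees index 1 is in range.
def pvStepA (st : PySem.Dict String Int × PySem.Dict String (List String)) (k : String) :
    PySem.Dict String Int × PySem.Dict String (List String) :=
  let reported := (PySem.List.pyGet? ((PySem.Str.split? k " ").getD []) 1).getD ""
  let reporter := (PySem.List.pyGet? ((PySem.Str.split? k " ").getD []) 0).getD ""
  let report_list :=
    if st.1.contains reported = false then st.1.insert reported 1
    else st.1.insert reported (st.1.getD reported 0 + 1)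
  let report_name :=
    if st.2.contains reporter = false then st.2.insert reporter [reported]
    else st.2.insert reporter (st.2.getD reporter [] ++ [reported])
  (report_list, report_name)

-- loop body of A's 'for name in id_list'
def pvStepX (st : PySem.Dict String Int × PySem.Dict String (List String)) (name : String) :
    PySem.Dict String Int × PySem.Dict String (List String) :=
  let report_list := if st.1.contains name = false then st.1.insert name (0 : Int) else st.1
  let report_name := if st.2.contains name = false then st.2.insert name ["X"] else st.2
  (report_list, report_name)

def solution (id_list : List String) (report : List String) (w : Int) : List (String × List String) :=
  let st := report.foldl pvStepA (PySem.Dict.empty, PySem.Dict.empty)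
  let st2 := id_list.foldl pvStepX st
  -- dead code of A, kept for faithfulness: sorted items and ban_list are computed, then dropped
  let report_list := PySem.List.sorted st2.1.items (fun x => x.2) true
  let _ban_list := report_list.foldl (fun b ban => if ban.2 == w then b ++ [ban.1] else b) ([] : List String)
  st2.2.items

-- ===== PORT B =====
def solution_alt (id_list : List String) (report : List String) (w : Int) : List (String × List String) :=
  let pairs := report.map (fun r => (PySem.Str.split? r " ").getD [])
  let order := PySem.List.dedup (pairs.map (fun p => (PySem.List.pyGet? p 0).getD "") ++ id_list)
  order.map (fun name =>
    let ts := (pairs.filter (fun p => (PySem.List.pyGet? p 0).getD "" == name)).map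
                (fun p => (PySem.List.pyGet? p 1).getD "")
    (name, if ts.isEmpty then ["X"] else ts))

-- ===== PRECONDITION & SPEC =====
-- Pre_ excludes exactly the reports with no space: there Python A's k.split(' ')[1] raises IndexError.
def Pre_solution (id_list : List String) (report : List String) (w : Int) : Prop :=
  ∀ r ∈ report, 2 ≤ ((PySem.Str.split? r " ").getD []).length
instance (id_list : List String) (report : List String) (w : Int) : Decidable (Pre_solution id_list report w) := by unfold Pre_solution; infer_instance
def pvWitness_solution : List String × List String × Int := (["muzi", "frodo"], ["muzi frodo", "frodo muzi", "muzi frodo"], 2)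

def Spec_solution (id_list : List String) (report : List String) (w : Int) (out : List (String × List String)) : Prop := out = solution_alt id_list report w
instance (id_list : List String) (report : List String) (w : Int) (out : List (String × List String)) : Decidable (Spec_solution id_list report w out) := by unfold Spec_solution; infer_instance

-- ===== CLAIM (what is proved, stated in full; the proofs are below) =====
def Claim_equal_solution : Prop := ∀ (id_list : List String) (report : List String) (w : Int), Dom_solution id_list report w → Pre_solution id_list report w → Spec_solution id_list report w (solution id_list report w)

-- ===== LEMMAS AND PROOFS =====

-- the reporter and reported tokens of one report line, as both ports compute them
def pvKey (r : String) : String := (PySem.List.pyGet? ((PySem.Str.split? r " ").getD []) 0).getD ""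
def pvTgt (r : String) : String := (PySem.List.pyGet? ((PySem.Str.split? r " ").getD []) 1).getD ""

lemma pvStepA_snd (st : PySem.Dict String Int × PySem.Dict String (List String)) (k : String) :
    (pvStepA st k).2 = st.2.modify (pvKey k) [] (· ++ [pvTgt k]) := by
  simp only [pvStepA, PySem.Dict.modify, pvKey, pvTgt]
  by_cases h : st.2.contains ((PySem.List.pyGet? ((PySem.Str.split? k " ").getD []) 0).getD "") = false
  · simp [h, PySem.Dict.getD_of_not_contains _ _ h]
  · simp [h]

lemma pvFoldA_snd (rs : List String) (st : PySem.Dict String Int × PySem.Dict String (List String)) :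
    (rs.foldl pvStepA st).2 = rs.foldl (fun d k => d.modify (pvKey k) [] (· ++ [pvTgt k])) st.2 := by
  induction rs generalizing st with
  | nil => rfl
  | cons k rs ih => simp only [List.foldl_cons, ih, pvStepA_snd]

lemma pvFoldX_snd (ids : List String) (st : PySem.Dict String Int × PySem.Dict String (List String)) :
    (ids.foldl pvStepX st).2 =
      ids.foldl (fun d n => if d.contains n = false then d.insert n ["X"] else d) st.2 := by
  induction ids generalizing st with
  | nil => rfl
  | cons n ids ih => simp only [List.foldl_cons, ih, pvStepX]

-- the 'for name in id_list' loop appends the missing names with value ['X']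
lemma pvItems_foldX (ids : List String) (d : PySem.Dict String (List String)) (hnd : d.keys.Nodup) :
    (ids.foldl (fun d n => if d.contains n = false then d.insert n ["X"] else d) d).items
      = (PySem.Set.update d.keys ids).map (fun n => (n, d.getD n ["X"])) := by
  induction ids generalizing d with
  | nil => simpa [PySem.Set.update_nil] using PySem.Dict.items_eq_map_keys d hnd ["X"]
  | cons n ids ih =>
    by_cases h : d.contains n = false
    · have hnm : n ∉ d.keys := by
        intro hm
        exact absurd ((PySem.Dict.contains_iff_mem_keys d n).mpr hm) (by simp [h])
      have hadd : PySem.Set.add d.keys n = d.keys ++ [n] := by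
        simp [PySem.Set.add, PySem.Set.contains, hnm]
      have hkeys : (d.insert n ["X"]).keys = d.keys ++ [n] :=
        PySem.Dict.keys_insert_of_not_contains d _ h
      have hnd' : (d.insert n ["X"]).keys.Nodup := by
        rw [hkeys, List.nodup_append]
        refine ⟨hnd, List.nodup_singleton n, ?_⟩
        intro a ha b hb
        have hb' : b = n := by simpa using hb
        subst hb'
        exact fun he => hnm (he ▸ ha)
      rw [List.foldl_cons, if_pos h]
      rw [ih _ hnd', hkeys, PySem.Set.update_cons, hadd]
      apply List.map_congr_left
      intro m _
      rw [PySem.Dict.getD_insert]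
      by_cases hm : m = n
      · subst hm; simp [PySem.Dict.getD_of_not_contains _ _ h]
      · simp [hm]
    · have hc : d.contains n = true := by
        cases hcc : d.contains n
        · exact absurd hcc h
        · rfl
      have hmem : n ∈ d.keys := (PySem.Dict.contains_iff_mem_keys d n).mp hc
      have hadd : PySem.Set.add d.keys n = d.keys := by
        simp [PySem.Set.add, PySem.Set.contains, hmem]
      rw [List.foldl_cons, if_neg (by simp [hc])]
      rw [ih d hnd, PySem.Set.update_cons, hadd]

-- the first loop as a grouping dict over (pvKey, pvTgt)
lemma pvRn1_eq (report : List String) :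
    report.foldl (fun d k => d.modify (pvKey k) [] (· ++ [pvTgt k])) PySem.Dict.empty
      = (report.map (fun k => (pvKey k, pvTgt k))).foldl
          (fun d p => d.modify p.1 [] (· ++ [p.2])) PySem.Dict.empty := by
  rw [List.foldl_map]

lemma pvRn1_keys (report : List String) :
    (report.foldl (fun d k => d.modify (pvKey k) [] (· ++ [pvTgt k])) PySem.Dict.empty).keys
      = PySem.Set.ofList (report.map pvKey) := by
  have := PySem.Dict.keys_foldl_modify_key report pvKey ([] : List String)
      (fun _ k v => v ++ [pvTgt k]) PySem.Dict.empty
  simpa [PySem.Set.update_nil_left] using this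

lemma pvRn1_nodup (report : List String) :
    (report.foldl (fun d k => d.modify (pvKey k) [] (· ++ [pvTgt k])) PySem.Dict.empty).keys.Nodup := by
  exact PySem.Dict.nodup_keys_foldl_modify_key report pvKey ([] : List String)
      (fun _ k v => v ++ [pvTgt k]) PySem.Dict.empty PySem.Dict.nodup_keys_empty

lemma pvRn1_getD (report : List String) (c : String) :
    (report.foldl (fun d k => d.modify (pvKey k) [] (· ++ [pvTgt k])) PySem.Dict.empty).getD c []
      = (report.filter (fun r => pvKey r == c)).map pvTgt := by
  rw [pvRn1_eq, PySem.Dict.getD_foldl_modify_append]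
  simp [List.filter_map, Function.comp_def, List.map_map]

-- pointwise: the dict's stored list (default ['X']) is B's filtered list (or ['X'] if empty)
lemma pvValue_eq (report : List String) (n : String) :
    (report.foldl (fun d k => d.modify (pvKey k) [] (· ++ [pvTgt k])) PySem.Dict.empty).getD n ["X"]
      = (if ((report.filter (fun r => pvKey r == n)).map pvTgt).isEmpty then ["X"]
         else (report.filter (fun r => pvKey r == n)).map pvTgt) := by
  set d := report.foldl (fun d k => d.modify (pvKey k) [] (· ++ [pvTgt k])) PySem.Dict.empty with hd
  by_cases hG : (report.filter (fun r => pvKey r == n)).map pvTgt = []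
  · have hnm : n ∉ report.map pvKey := by
      intro hm
      rcases List.mem_map.mp hm with ⟨r, hr, hkr⟩
      have : r ∈ report.filter (fun r => pvKey r == n) :=
        List.mem_filter.mpr ⟨hr, by simp [hkr]⟩
      have : pvTgt r ∈ (report.filter (fun r => pvKey r == n)).map pvTgt :=
        List.mem_map_of_mem this
      simp [hG] at this
    have hnk : n ∉ d.keys := by
      rw [hd, pvRn1_keys]
      intro hm
      exact hnm ((PySem.Set.mem_ofList _ _).mp hm)
    have hc : d.contains n = false := by
      cases hcc : d.contains n
      · rfl
      · exact absurd ((PySem.Dict.contains_iff_mem_keys d n).mp hcc) hnk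
    rw [PySem.Dict.getD_of_not_contains _ _ hc]
    simp [hG]
  · rcases List.exists_mem_of_ne_nil ((report.filter (fun r => pvKey r == n)).map pvTgt) hG with ⟨t, ht⟩
    rcases List.mem_map.mp ht with ⟨r, hrf, _⟩
    rcases List.mem_filter.mp hrf with ⟨hr, hk⟩
    have hnk : n ∈ d.keys := by
      rw [hd, pvRn1_keys]
      exact (PySem.Set.mem_ofList _ _).mpr (List.mem_map.mpr ⟨r, hr, by simpa using hk⟩)
    have hc : d.contains n = true := (PySem.Dict.contains_iff_mem_keys d n).mpr hnk
    have hs : (d.get? n).isSome = true := by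
      rw [PySem.Dict.contains_eq_isSome_get?] at hc; exact hc
    rcases Option.isSome_iff_exists.mp hs with ⟨v, hv⟩
    have h1 : d.getD n ["X"] = v := PySem.Dict.getD_of_get?_eq_some _ _ hv
    have h2 : d.getD n [] = v := PySem.Dict.getD_of_get?_eq_some _ _ hv
    rw [h1, ← h2, hd, pvRn1_getD, if_neg (by simp; exact ⟨r, hr, by simpa using hk⟩)]

theorem pv_main (id_list report : List String) (w : Int) :
    solution id_list report w = solution_alt id_list report w := by
  simp only [solution, solution_alt]
  rw [pvFoldX_snd, pvFoldA_snd]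
  rw [pvItems_foldX _ _ (pvRn1_nodup report), pvRn1_keys]
  have horder : PySem.List.dedup
        ((report.map (fun r => (PySem.Str.split? r " ").getD [])).map
            (fun p => (PySem.List.pyGet? p 0).getD "") ++ id_list)
      = PySem.Set.update (PySem.Set.ofList (report.map pvKey)) id_list := by
    rw [List.map_map, ← PySem.Set.ofList_append]
    rfl
  rw [← horder]
  apply List.map_congr_left
  intro n _
  rw [pvValue_eq]
  simp only [List.filter_map, List.map_map, Function.comp_def]
  rfl

-- ===== VERDICT (by name: the statement is the Claim_ definition above) =====
theorem solution_spec : Claim_equal_solution := by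
  intro id_list report w _ _
  unfold Spec_solution
  exact pv_main id_list report w
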